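-- pv_equiv track=rewrite | github.com/randy-25/Tubes-Daspro | personalCommand.py | stringCompare
-- ===== SOURCE A (Python) =====
-- def stringCompare(stringA,stringB):
--     a = -999
--     b = -999
--     abjadListGede = ['A','B','C','D','E','F','G','H','I','J','K','L','M','N','O','P','Q','R','S','T','U','V','W','X','Y','Z']
--     abjadListKecil = ['a','b','c','d','e','f','g','h','i','j','k','l','m','n','o','p','q','r','s','t','u','v','w','x','y','z']
--     for i in range(26):
--         if stringA[0] == abjadListKecil[i] :
--             a = i
--         if stringB[0] == abjadListKecil[i] :
--             b = i
--         if stringA[0] == abjadListGede[i] :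
--             a = i
--         if stringB[0] == abjadListGede[i] :
--             b = i
--     return a,b
-- ===== SOURCE B (Python) =====
-- def stringCompare(stringA, stringB):
--     def idx(s):
--         c = s[0]
--         if 'a' <= c <= 'z':
--             return ord(c) - ord('a')
--         if 'A' <= c <= 'Z':
--             return ord(c) - ord('A')
--         return -999
--     return idx(stringA), idx(stringB)
-- ===== Notes on version B (the rewrite author's own statement) =====
-- stated objective: simpler
-- what changed: Replaces the two 26-element alphabet tables and the 26-iteration scan with a helper that computes the index by ordinal arithmetic (ord(c)-ord('a')/ord('A')) after two range checks on the first character.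
import Mathlib
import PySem

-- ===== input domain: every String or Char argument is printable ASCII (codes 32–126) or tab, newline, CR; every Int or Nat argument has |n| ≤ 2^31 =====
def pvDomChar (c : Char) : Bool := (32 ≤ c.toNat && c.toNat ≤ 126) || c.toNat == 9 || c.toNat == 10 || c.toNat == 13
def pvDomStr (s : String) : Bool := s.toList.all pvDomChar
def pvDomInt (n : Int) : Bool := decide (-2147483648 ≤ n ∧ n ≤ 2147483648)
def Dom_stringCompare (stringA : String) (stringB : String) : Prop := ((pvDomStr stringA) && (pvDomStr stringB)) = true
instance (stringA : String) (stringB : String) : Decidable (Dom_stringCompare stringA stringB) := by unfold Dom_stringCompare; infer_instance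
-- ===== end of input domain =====

-- B replaces A's two 26-letter lookup tables and 26-step loop by ordinal arithmetic on the
-- first character (objective: simpler). Equivalence is about the return value; both raise on "".

-- ===== PORT A =====
def abjadListGede : List Char :=
  ['A','B','C','D','E','F','G','H','I','J','K','L','M','N','O','P','Q','R','S','T','U','V','W','X','Y','Z']
def abjadListKecil : List Char :=
  ['a','b','c','d','e','f','g','h','i','j','k','l','m','n','o','p','q','r','s','t','u','v','w','x','y','z']

def stringCompare (stringA : String) (stringB : String) : Int × Int :=
  (PySem.List.pyRange 0 26 1).foldl
    (fun (p : Int × Int) i =>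
      let a1 := if PySem.Str.pyGet? stringA 0 = PySem.List.pyGet? abjadListKecil i then i else p.1
      let b1 := if PySem.Str.pyGet? stringB 0 = PySem.List.pyGet? abjadListKecil i then i else p.2
      let a2 := if PySem.Str.pyGet? stringA 0 = PySem.List.pyGet? abjadListGede i then i else a1
      let b2 := if PySem.Str.pyGet? stringB 0 = PySem.List.pyGet? abjadListGede i then i else b1
      (a2, b2))
    (-999, -999)

-- ===== PORT B =====
def idxAlt (s : String) : Int :=
  match PySem.Str.pyGet? s 0 with
  | none => -999   -- unreachable under Pre_ (the Python B raises on "")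
  | some c =>
      if 'a' ≤ c ∧ c ≤ 'z' then (c.toNat : Int) - 97
      else if 'A' ≤ c ∧ c ≤ 'Z' then (c.toNat : Int) - 65
      else -999

def stringCompare_alt (stringA : String) (stringB : String) : Int × Int :=
  (idxAlt stringA, idxAlt stringB)

-- ===== PRECONDITION & SPEC =====
-- Pre_ excludes empty strings: A raises IndexError on stringX[0] there (B raises too).
def Pre_stringCompare (stringA : String) (stringB : String) : Prop :=
  stringA ≠ "" ∧ stringB ≠ ""
instance (stringA : String) (stringB : String) : Decidable (Pre_stringCompare stringA stringB) := by
  unfold Pre_stringCompare; infer_instance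

def pvWitness_stringCompare : String × String := ("hello", "World")

def Spec_stringCompare (stringA : String) (stringB : String) (out : Int × Int) : Prop :=
  out = stringCompare_alt stringA stringB
instance (stringA : String) (stringB : String) (out : Int × Int) : Decidable (Spec_stringCompare stringA stringB out) := by
  unfold Spec_stringCompare; infer_instance

-- ===== CLAIM (what is proved, stated in full; the proofs are below) =====
def Claim_equal_stringCompare : Prop := ∀ (stringA : String) (stringB : String), Dom_stringCompare stringA stringB → Pre_stringCompare stringA stringB → Spec_stringCompare stringA stringB (stringCompare stringA stringB)

-- ===== LEMMAS AND PROOFS =====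

-- the per-component scan of A's loop
def scanOne (oc : Option Char) : Int :=
  (PySem.List.pyRange 0 26 1).foldl
    (fun (a : Int) i =>
      let a1 := if oc = PySem.List.pyGet? abjadListKecil i then i else a
      if oc = PySem.List.pyGet? abjadListGede i then i else a1)
    (-999)

theorem foldl_pair {α : Type} (l : List α) (fa fb : Int → α → Int) (a b : Int) :
    l.foldl (fun (p : Int × Int) i => (fa p.1 i, fb p.2 i)) (a, b)
      = (l.foldl fa a, l.foldl fb b) := by
  induction l generalizing a b with
  | nil => rfl
  | cons x xs ih => simpa using ih (fa a x) (fb b x)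

theorem stringCompare_eq_scan (stringA stringB : String) :
    stringCompare stringA stringB
      = (scanOne (PySem.Str.pyGet? stringA 0), scanOne (PySem.Str.pyGet? stringB 0)) := by
  unfold stringCompare scanOne
  exact foldl_pair (PySem.List.pyRange 0 26 1)
    (fun a i =>
      let a1 := if PySem.Str.pyGet? stringA 0 = PySem.List.pyGet? abjadListKecil i then i else a
      if PySem.Str.pyGet? stringA 0 = PySem.List.pyGet? abjadListGede i then i else a1)
    (fun b i =>
      let b1 := if PySem.Str.pyGet? stringB 0 = PySem.List.pyGet? abjadListKecil i then i else b
      if PySem.Str.pyGet? stringB 0 = PySem.List.pyGet? abjadListGede i then i else b1)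
    (-999) (-999)

set_option maxRecDepth 4000 in
theorem scanOne_eq_idx (n : Fin 128) :
    scanOne (some (Char.ofNat n.val))
      = (if 'a' ≤ Char.ofNat n.val ∧ Char.ofNat n.val ≤ 'z' then ((Char.ofNat n.val).toNat : Int) - 97
         else if 'A' ≤ Char.ofNat n.val ∧ Char.ofNat n.val ≤ 'Z' then ((Char.ofNat n.val).toNat : Int) - 65
         else -999) := by
  revert n; decide

theorem idxAlt_eq (s : String) (c : Char) (rest : List Char) (hs : s.toList = c :: rest) :
    PySem.Str.pyGet? s 0 = some c ∧ idxAlt s =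
      (if 'a' ≤ c ∧ c ≤ 'z' then (c.toNat : Int) - 97
       else if 'A' ≤ c ∧ c ≤ 'Z' then (c.toNat : Int) - 65
       else -999) := by
  have hg : PySem.Str.pyGet? s 0 = some c := by
    simp [PySem.Str.pyGet?_eq, hs, PySem.Chars.pyGet?_eq_listPyGet?]
  refine ⟨hg, ?_⟩
  simp [idxAlt, PySem.Str.pyGet?_eq, PySem.Chars.pyGet?_eq_listPyGet?, hs]

theorem scan_side (s : String) (hd : pvDomStr s = true) (hne : s ≠ "") :
    scanOne (PySem.Str.pyGet? s 0) = idxAlt s := by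
  obtain ⟨c, rest, hs⟩ : ∃ c rest, s.toList = c :: rest := by
    cases h : s.toList with
    | nil => exact absurd (String.toList_eq_nil_iff.mp h) hne
    | cons c rest => exact ⟨c, rest, rfl⟩
  obtain ⟨hg, hidx⟩ := idxAlt_eq s c rest hs
  have hc : pvDomChar c = true := by
    have := hd; unfold pvDomStr at this
    have h2 : ∀ x ∈ s.toList, pvDomChar x = true := List.all_eq_true.mp this
    exact h2 c (by simp [hs])
  have hlt : c.toNat < 128 := by
    unfold pvDomChar at hc
    simp only [Bool.or_eq_true, Bool.and_eq_true, decide_eq_true_eq, beq_iff_eq] at hc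
    omega
  have := scanOne_eq_idx ⟨c.toNat, hlt⟩
  rw [Char.ofNat_toNat c] at this
  rw [hg, this, hidx]

-- ===== VERDICT (by name: the statement is the Claim_ definition above) =====
theorem stringCompare_spec : Claim_equal_stringCompare := by
  intro sA sB hdom hpre
  unfold Spec_stringCompare
  obtain ⟨hA, hB⟩ := hpre
  have hd : pvDomStr sA = true ∧ pvDomStr sB = true := by
    unfold Dom_stringCompare at hdom; simpa using hdom
  rw [stringCompare_eq_scan, scan_side sA hd.1 hA, scan_side sB hd.2 hB]
  rfl
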